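-- pv_equiv track=rewrite | github.com/turnstilelabs/arxitex | arxitex/tools/retrieval/colgrep_chunks.py | _split_paragraphs_with_index
-- ===== SOURCE A (Python) =====
-- from typing import Dict, List, Tuple
--
-- def _split_paragraphs_with_index(lines: List[str]) -> Tuple[List[str], List[int]]:
--     paragraphs: List[str] = []
--     line_to_para = [-1 for _ in lines]
--     current: List[str] = []
--     para_idx = -1
--     for i, line in enumerate(lines):
--         if line.strip():
--             if not current:
--                 para_idx += 1
--                 paragraphs.append("")
--             current.append(line.strip())
--             paragraphs[para_idx] = " ".join(current).strip()
--             line_to_para[i] = para_idx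
--         else:
--             current = []
--     return paragraphs, line_to_para
-- ===== SOURCE B (Python) =====
-- from typing import Dict, List, Tuple
--
-- def _split_paragraphs_with_index(lines: List[str]) -> Tuple[List[str], List[int]]:
--     # Chunked scan: find each maximal run of equally-blank lines, emit the whole
--     # run at once (one join per paragraph instead of re-joining per line).
--     paragraphs: List[str] = []
--     line_to_para: List[int] = []
--     i, n = 0, len(lines)
--     while i < n:
--         blank = not lines[i].strip()
--         j = i + 1
--         while j < n and (not lines[j].strip()) == blank:
--             j += 1
--         if blank:
--             line_to_para.extend([-1] * (j - i))
--         else: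
--             line_to_para.extend([len(paragraphs)] * (j - i))
--             paragraphs.append(" ".join(l.strip() for l in lines[i:j]))
--         i = j
--     return paragraphs, line_to_para
-- ===== Notes on version B (the rewrite author's own statement) =====
-- stated objective: faster
-- what changed: A walks line by line keeping a mutable current-paragraph list and re-joining (and re-writing) the growing paragraph after every non-blank line; B scans maximal runs of equally-blank lines, emits each paragraph with a single join and extends the index list per run.
import Mathlib
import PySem

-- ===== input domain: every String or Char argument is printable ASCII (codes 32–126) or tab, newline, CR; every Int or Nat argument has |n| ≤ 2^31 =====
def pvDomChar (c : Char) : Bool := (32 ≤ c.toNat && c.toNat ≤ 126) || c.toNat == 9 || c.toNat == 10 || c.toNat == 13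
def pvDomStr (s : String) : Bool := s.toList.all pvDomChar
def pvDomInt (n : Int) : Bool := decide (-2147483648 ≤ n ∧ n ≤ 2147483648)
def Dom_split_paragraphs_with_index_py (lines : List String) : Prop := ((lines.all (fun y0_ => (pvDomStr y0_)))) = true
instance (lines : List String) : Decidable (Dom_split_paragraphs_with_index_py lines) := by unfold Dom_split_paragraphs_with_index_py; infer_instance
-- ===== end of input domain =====

-- B replaces A's per-line state machine (which re-joins the growing paragraph after every
-- line) by a chunked scan over maximal runs of equally-blank lines, joining each paragraph once.


-- ===== PORT A =====
-- the loop body of A; `paragraphs[para_idx] = …` and `line_to_para[i] = …` are ported as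
-- List.set at the (always in-range, nonnegative) Python index, exact on the reachable states
def pvStepA (st : List String × List Int × List String × Int) (il : Int × String) :
    List String × List Int × List String × Int :=
  let paragraphs := st.1
  let line_to_para := st.2.1
  let current := st.2.2.1
  let para_idx := st.2.2.2
  if PySem.Str.strip il.2 ≠ "" then
    let pp := if current.isEmpty then (paragraphs ++ [""], para_idx + 1) else (paragraphs, para_idx)
    let paragraphs := pp.1
    let para_idx := pp.2
    let current := current ++ [PySem.Str.strip il.2]
    let paragraphs := paragraphs.set para_idx.toNat (PySem.Str.strip (PySem.Str.join " " current))
    let line_to_para := line_to_para.set il.1.toNat para_idx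
    (paragraphs, line_to_para, current, para_idx)
  else
    (paragraphs, line_to_para, ([] : List String), para_idx)

def split_paragraphs_with_index_py (lines : List String) : List String × List Int :=
  let st := (PySem.List.enumerate lines).foldl pvStepA
    ([], lines.map (fun _ => (-1 : Int)), ([] : List String), (-1 : Int))
  (st.1, st.2.1)

-- ===== PORT B =====
def pvBlankB (s : String) : Bool := PySem.Str.strip s == ""

-- the outer while-loop of B: peel off the maximal run of lines as blank as the first one
def pvAltLoop (xs : List String) (ps : List String) (m : List Int) : List String × List Int :=
  match xs with
  | [] => (ps, m)
  | l :: rest =>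
    if h : pvBlankB l = true then
      pvAltLoop ((l :: rest).dropWhile pvBlankB) ps
        (m ++ ((l :: rest).takeWhile pvBlankB).map (fun _ => (-1 : Int)))
    else
      let chunk := (l :: rest).takeWhile (fun x => !pvBlankB x)
      pvAltLoop ((l :: rest).dropWhile (fun x => !pvBlankB x))
        (ps ++ [PySem.Str.join " " (chunk.map PySem.Str.strip)])
        (m ++ chunk.map (fun _ => (ps.length : Int)))
  termination_by xs.length
  decreasing_by
  · simp only [List.dropWhile_cons, h, if_true]
    exact Nat.lt_succ_of_le (List.length_dropWhile_le _ _)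
  · simp only [List.dropWhile_cons, h, Bool.not_false, if_true]
    exact Nat.lt_succ_of_le (List.length_dropWhile_le _ _)

def split_paragraphs_with_index_py_alt (lines : List String) : List String × List Int :=
  pvAltLoop lines [] []

-- ===== PRECONDITION & SPEC =====
def Spec_split_paragraphs_with_index_py (lines : List String) (out : List String × List Int) : Prop := out = split_paragraphs_with_index_py_alt lines
instance (lines : List String) (out : List String × List Int) : Decidable (Spec_split_paragraphs_with_index_py lines out) := by unfold Spec_split_paragraphs_with_index_py; infer_instance

-- ===== CLAIM (what is proved, stated in full; the proofs are below) =====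
def Claim_equal_split_paragraphs_with_index_py : Prop := ∀ (lines : List String), Dom_split_paragraphs_with_index_py lines → Spec_split_paragraphs_with_index_py lines (split_paragraphs_with_index_py lines)


-- ===== LEMMAS AND PROOFS =====

-- A's paragraph text: join current with spaces, then strip
def pjA (cur : List String) : String := PySem.Str.strip (PySem.Str.join " " cur)

-- reference recursion: A's loop, per line, with the output index list built by cons
def aLoop (ls : List String) (ps : List String) (cur : List String) : List String × List Int :=
  match ls with
  | [] => (ps, [])
  | l :: t =>
    if PySem.Str.strip l ≠ "" then
      let cur' := cur ++ [PySem.Str.strip l]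
      let ps' := if cur.isEmpty then ps ++ [pjA cur'] else ps.set (ps.length - 1) (pjA cur')
      let r := aLoop t ps' cur'
      (r.1, ((ps'.length : Int) - 1) :: r.2)
    else
      let r := aLoop t ps []
      (r.1, (-1 : Int) :: r.2)

lemma pv_enum_cons {α : Type} (x : α) (xs : List α) (k : Int) :
    PySem.List.enumerate (x :: xs) k = (k, x) :: PySem.List.enumerate xs (k + 1) := rfl

lemma pv_set_append_len {α : Type} (xs : List α) (y : α) (zs : List α) (v : α) :
    (xs ++ y :: zs).set xs.length v = xs ++ v :: zs := by
  induction xs with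
  | nil => rfl
  | cons a t ih => simp [ih]

lemma pv_set_last {α : Type} (ps : List α) (v : α) (h : ps ≠ []) :
    ps.set (ps.length - 1) v = ps.dropLast ++ [v] := by
  induction ps with
  | nil => exact absurd rfl h
  | cons a t ih =>
    cases t with
    | nil => rfl
    | cons b t' =>
      have h2 := ih (by simp)
      simp only [List.length_cons, Nat.add_sub_cancel] at h2
      show (a :: b :: t').set (t'.length + 1) v = (a :: b :: t').dropLast ++ [v]
      rw [List.set_cons_succ, h2]
      simp

-- unfolding lemmas for aLoop
lemma aLoop_nil (ps cur : List String) : aLoop [] ps cur = (ps, []) := rfl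

lemma aLoop_cons_blank (l : String) (t ps cur : List String) (h : PySem.Str.strip l = "") :
    aLoop (l :: t) ps cur = ((aLoop t ps []).1, (-1 : Int) :: (aLoop t ps []).2) := by
  simp only [aLoop, h, ne_eq, not_true_eq_false, if_false]

lemma aLoop_cons_nb_nil (l : String) (t ps : List String) (h : PySem.Str.strip l ≠ "") :
    aLoop (l :: t) ps [] =
      ((aLoop t (ps ++ [pjA [PySem.Str.strip l]]) [PySem.Str.strip l]).1,
       (ps.length : Int) :: (aLoop t (ps ++ [pjA [PySem.Str.strip l]]) [PySem.Str.strip l]).2) := by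
  simp only [aLoop, h, ne_eq, not_false_eq_true, if_true, List.isEmpty_nil, List.nil_append]
  have hll : ((ps ++ [pjA [PySem.Str.strip l]]).length : Int) - 1 = (ps.length : Int) := by
    simp
  rw [hll]

lemma aLoop_cons_nb_cons (l : String) (t ps : List String) (a : String) (b : List String)
    (h : PySem.Str.strip l ≠ "") :
    aLoop (l :: t) ps (a :: b) =
      ((aLoop t (ps.set (ps.length - 1) (pjA ((a :: b) ++ [PySem.Str.strip l]))) ((a :: b) ++ [PySem.Str.strip l])).1,
       ((ps.length : Int) - 1) ::
        (aLoop t (ps.set (ps.length - 1) (pjA ((a :: b) ++ [PySem.Str.strip l]))) ((a :: b) ++ [PySem.Str.strip l])).2) := by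
  simp only [aLoop, h, ne_eq, not_false_eq_true, if_true, List.isEmpty_cons, if_false,
    Bool.false_eq_true, List.length_set]

-- A's fold over `enumerate`, run from an arbitrary state, computes aLoop
lemma pv_fold_eq_aLoop (ls : List String) : ∀ (done : List Int) (ps cur : List String) (pi : Int),
    (cur ≠ [] → ps ≠ []) → pi = (ps.length : Int) - 1 →
    ∃ c p, (PySem.List.enumerate ls (done.length)).foldl pvStepA
        (ps, done ++ ls.map (fun _ => (-1 : Int)), cur, pi)
      = ((aLoop ls ps cur).1, done ++ (aLoop ls ps cur).2, c, p) := by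
  induction ls with
  | nil =>
    intro done ps cur pi _ _
    exact ⟨cur, pi, by simp [aLoop, PySem.List.enumerate]⟩
  | cons l t ih =>
    intro done ps cur pi hpc hpi
    rw [pv_enum_cons, List.map_cons, List.foldl_cons]
    by_cases hb : PySem.Str.strip l = ""
    · -- blank line: state unchanged except current := []
      have e1 : pvStepA (ps, done ++ (-1 : Int) :: t.map (fun _ => (-1 : Int)), cur, pi)
            ((done.length : Int), l)
          = (ps, (done ++ [(-1 : Int)]) ++ t.map (fun _ => (-1 : Int)), [], pi) := by
        simp [pvStepA, hb]
      rw [e1]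
      have e2 : ((done.length : Int) + 1) = (((done ++ [(-1 : Int)]).length : Int)) := by
        simp
      rw [e2]
      obtain ⟨c, p, hcp⟩ := ih (done ++ [(-1 : Int)]) ps [] pi (by intro h; exact absurd rfl h) hpi
      rw [hcp]
      exact ⟨c, p, by rw [aLoop_cons_blank _ _ _ _ hb]; simp⟩
    · -- non-blank line
      cases cur with
      | nil =>
        have ht : (pi + 1).toNat = ps.length := by omega
        have e1 : pvStepA (ps, done ++ (-1 : Int) :: t.map (fun _ => (-1 : Int)), [], pi)
              ((done.length : Int), l)
            = (ps ++ [pjA [PySem.Str.strip l]],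
               (done ++ [pi + 1]) ++ t.map (fun _ => (-1 : Int)),
               [PySem.Str.strip l], pi + 1) := by
          simp only [pvStepA, hb, ne_eq, not_false_eq_true, if_true, List.isEmpty_nil,
            List.nil_append, Int.toNat_natCast, ht, pjA]
          rw [pv_set_append_len ps "" [] _, pv_set_append_len done _ _ _]
          simp
        rw [e1]
        have e2 : ((done.length : Int) + 1) = (((done ++ [pi + 1]).length : Int)) := by simp
        rw [e2]
        obtain ⟨c, p, hcp⟩ := ih (done ++ [pi + 1]) (ps ++ [pjA [PySem.Str.strip l]])
          [PySem.Str.strip l] (pi + 1) (by simp) (by simp; omega)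
        rw [hcp]
        refine ⟨c, p, ?_⟩
        rw [aLoop_cons_nb_nil _ _ _ hb]
        have : pi + 1 = (ps.length : Int) := by omega
        simp [this]
      | cons a b =>
        have hps : ps ≠ [] := hpc (by simp)
        have hlp : 0 < ps.length := List.length_pos_iff.mpr hps
        have ht : pi.toNat = ps.length - 1 := by omega
        have e1 : pvStepA (ps, done ++ (-1 : Int) :: t.map (fun _ => (-1 : Int)), a :: b, pi)
              ((done.length : Int), l)
            = (ps.set (ps.length - 1) (pjA ((a :: b) ++ [PySem.Str.strip l])),
               (done ++ [pi]) ++ t.map (fun _ => (-1 : Int)),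
               (a :: b) ++ [PySem.Str.strip l], pi) := by
          simp only [pvStepA, hb, ne_eq, not_false_eq_true, if_true, List.isEmpty_cons,
            Bool.false_eq_true, if_false, Int.toNat_natCast, ht, pjA]
          rw [pv_set_append_len done _ _ _]
          simp
        rw [e1]
        have e2 : ((done.length : Int) + 1) = (((done ++ [pi]).length : Int)) := by simp
        rw [e2]
        have hset : (ps.set (ps.length - 1) (pjA ((a :: b) ++ [PySem.Str.strip l]))) ≠ [] := by
          intro hB
          have h0 := congrArg List.length hB
          rw [List.length_set] at h0
          simp only [List.length_nil] at h0
          omega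
        obtain ⟨c, p, hcp⟩ := ih (done ++ [pi])
          (ps.set (ps.length - 1) (pjA ((a :: b) ++ [PySem.Str.strip l])))
          ((a :: b) ++ [PySem.Str.strip l]) pi (fun _ => hset) (by simp [List.length_set, hpi])
        rw [hcp]
        refine ⟨c, p, ?_⟩
        rw [aLoop_cons_nb_cons _ _ _ _ _ hb]
        have : (ps.length : Int) - 1 = pi := hpi.symm
        simp [this]

lemma pv_blank_run (chunk : List String) : ∀ (ls ps : List String),
    (∀ l ∈ chunk, PySem.Str.strip l = "") →
    aLoop (chunk ++ ls) ps [] =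
      ((aLoop ls ps []).1, chunk.map (fun _ => (-1 : Int)) ++ (aLoop ls ps []).2) := by
  induction chunk with
  | nil => intro ls ps _; simp
  | cons c k ih =>
    intro ls ps h
    rw [List.cons_append, aLoop_cons_blank _ _ _ _ (h c (by simp)),
      ih ls ps (fun x hx => h x (by simp [hx]))]
    simp

lemma pv_nonblank_run (chunk : List String) : ∀ (ls ps cur : List String),
    cur ≠ [] → ps ≠ [] → ps.getLast? = some (pjA cur) →
    (∀ l ∈ chunk, PySem.Str.strip l ≠ "") →
    aLoop (chunk ++ ls) ps cur =
      ((aLoop ls (ps.dropLast ++ [pjA (cur ++ chunk.map PySem.Str.strip)])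
          (cur ++ chunk.map PySem.Str.strip)).1,
       chunk.map (fun _ => ((ps.length : Int) - 1)) ++
        (aLoop ls (ps.dropLast ++ [pjA (cur ++ chunk.map PySem.Str.strip)])
          (cur ++ chunk.map PySem.Str.strip)).2) := by
  induction chunk with
  | nil =>
    intro ls ps cur hcur hps hlast _
    obtain ⟨ys, hys⟩ := List.getLast?_eq_some_iff.mp hlast
    subst hys
    simp [List.dropLast_concat]
  | cons c k ih =>
    intro ls ps cur hcur hps hlast hmem
    obtain ⟨a, b, rfl⟩ := List.exists_cons_of_ne_nil hcur
    have hlp : 0 < ps.length := List.length_pos_iff.mpr hps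
    rw [List.cons_append, aLoop_cons_nb_cons _ _ _ _ _ (hmem c (by simp))]
    have hset := pv_set_last ps (pjA ((a :: b) ++ [PySem.Str.strip c])) hps
    rw [hset]
    have hlen : (ps.dropLast ++ [pjA ((a :: b) ++ [PySem.Str.strip c])]).length = ps.length := by
      simp [List.length_dropLast]
      omega
    have ih' := ih ls (ps.dropLast ++ [pjA ((a :: b) ++ [PySem.Str.strip c])])
      ((a :: b) ++ [PySem.Str.strip c]) (by simp) (by simp)
      (by simp) (fun x hx => hmem x (by simp [hx]))
    rw [ih']
    rw [List.dropLast_concat]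
    have hcs : ((a :: b) ++ [PySem.Str.strip c]) ++ k.map PySem.Str.strip
        = (a :: b) ++ (c :: k).map PySem.Str.strip := by simp
    rw [hcs]
    rw [hlen]
    simp

lemma pv_cur_irrel (ls ps cur : List String)
    (h : ls = [] ∨ ∃ c t, ls = c :: t ∧ PySem.Str.strip c = "") :
    aLoop ls ps cur = aLoop ls ps [] := by
  rcases h with rfl | ⟨c, t, rfl, hc⟩
  · rfl
  · rw [aLoop_cons_blank _ _ _ _ hc, aLoop_cons_blank _ _ _ _ hc]

-- ---- strip ∘ join lemmas (Chars level) ----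

lemma pv_dropWhile_fix_head {α : Type} (p : α → Bool) (c : α) (w : List α)
    (h : List.dropWhile p (c :: w) = c :: w) : p c = false := by
  by_cases hp : p c = true
  · rw [List.dropWhile_cons, if_pos hp] at h
    have h1 := List.length_dropWhile_le p w
    have h2 := congrArg List.length h
    simp at h2
    omega
  · simpa using hp

lemma pv_dropWhile_idem {α : Type} (p : α → Bool) (l : List α) :
    List.dropWhile p (List.dropWhile p l) = List.dropWhile p l := by
  induction l with
  | nil => simp
  | cons a t ih =>
    by_cases hp : p a = true
    · simp [List.dropWhile_cons, hp, ih]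
    · simp [List.dropWhile_cons, hp]

lemma pv_lfix_append {α : Type} (p : α → Bool) (x y : List α)
    (hx : List.dropWhile p x = x) (hne : x ≠ []) :
    List.dropWhile p (x ++ y) = x ++ y := by
  cases x with
  | nil => exact absurd rfl hne
  | cons c w =>
    have hc := pv_dropWhile_fix_head p c w hx
    simp [List.dropWhile_cons, hc]

lemma pv_rfix_append {α : Type} (p : α → Bool) (x y : List α)
    (hy : List.dropWhile p y.reverse = y.reverse) (hne : y ≠ []) :
    (List.dropWhile p (x ++ y).reverse).reverse = x ++ y := by
  rw [List.reverse_append, pv_lfix_append p _ x.reverse hy (by simpa using hne)]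
  simp

lemma pv_strip_fix (cs : List Char) :
    List.dropWhile PySem.Chars.isspace (PySem.Chars.strip cs) = PySem.Chars.strip cs ∧
    List.dropWhile PySem.Chars.isspace (PySem.Chars.strip cs).reverse = (PySem.Chars.strip cs).reverse := by
  unfold PySem.Chars.strip PySem.Chars.rstrip PySem.Chars.lstrip
  constructor
  · obtain ⟨t, ht⟩ := List.dropWhile_suffix (l := (List.dropWhile PySem.Chars.isspace cs).reverse)
      PySem.Chars.isspace
    have hapre : List.dropWhile PySem.Chars.isspace cs
        = (List.dropWhile PySem.Chars.isspace (List.dropWhile PySem.Chars.isspace cs).reverse).reverse ++ t.reverse := by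
      have h2 := congrArg List.reverse ht
      simpa [List.reverse_append] using h2.symm
    cases hsr : (List.dropWhile PySem.Chars.isspace (List.dropWhile PySem.Chars.isspace cs).reverse).reverse with
    | nil => simp [hsr]
    | cons c w =>
      rw [hsr] at hapre
      have hidem := pv_dropWhile_idem PySem.Chars.isspace cs
      rw [hapre] at hidem
      have hc : PySem.Chars.isspace c = false := by
        apply pv_dropWhile_fix_head PySem.Chars.isspace c (w ++ t.reverse)
        simpa using hidem
      simp [List.dropWhile_cons, hc]
  · rw [List.reverse_reverse]
    exact pv_dropWhile_idem _ _

lemma pv_join_concat (sep : List Char) (init : List (List Char)) (q : List Char) (h : init ≠ []) :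
    PySem.Chars.join sep (init ++ [q]) = PySem.Chars.join sep init ++ sep ++ q := by
  induction init with
  | nil => exact absurd rfl h
  | cons a t ih =>
    cases t with
    | nil => simp [PySem.Chars.join_cons_cons, PySem.Chars.join_singleton]
    | cons b t' =>
      rw [List.cons_append, List.cons_append, PySem.Chars.join_cons_cons,
        ← List.cons_append, ih (by simp), PySem.Chars.join_cons_cons]
      simp [List.append_assoc]

lemma pv_chars_strip_join (parts : List (List Char)) (hne : parts ≠ [])
    (h : ∀ q ∈ parts, List.dropWhile PySem.Chars.isspace q = q ∧
        List.dropWhile PySem.Chars.isspace q.reverse = q.reverse ∧ q ≠ []) :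
    PySem.Chars.strip (PySem.Chars.join [' '] parts) = PySem.Chars.join [' '] parts := by
  unfold PySem.Chars.strip PySem.Chars.rstrip PySem.Chars.lstrip
  have hl : List.dropWhile PySem.Chars.isspace (PySem.Chars.join [' '] parts)
      = PySem.Chars.join [' '] parts := by
    cases parts with
    | nil => exact absurd rfl hne
    | cons p0 rest =>
      obtain ⟨h1, _, h3⟩ := h p0 (by simp)
      cases rest with
      | nil => simpa [PySem.Chars.join_singleton] using h1
      | cons q r =>
        rw [PySem.Chars.join_cons_cons, List.append_assoc]
        exact pv_lfix_append _ _ _ h1 h3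
  rw [hl]
  rcases List.eq_nil_or_concat parts with rfl | ⟨init, q, hq⟩
  · exact absurd rfl hne
  · rw [List.concat_eq_append] at hq
    subst hq
    obtain ⟨_, h2, h3⟩ := h q (by simp)
    cases init with
    | nil =>
      simp only [List.nil_append, PySem.Chars.join_singleton]
      rw [h2]
      simp
    | cons a t =>
      rw [pv_join_concat _ _ _ (by simp)]
      exact pv_rfix_append _ _ _ h2 h3

lemma pv_strip_join (chunk : List String) (hne : chunk ≠ [])
    (h : ∀ l ∈ chunk, PySem.Str.strip l ≠ "") :
    PySem.Str.strip (PySem.Str.join " " (chunk.map PySem.Str.strip))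
      = PySem.Str.join " " (chunk.map PySem.Str.strip) := by
  apply String.toList_injective
  rw [PySem.Str.toList_strip, PySem.Str.toList_join]
  have hmap : (chunk.map PySem.Str.strip).map String.toList
      = chunk.map (fun l => PySem.Chars.strip l.toList) := by
    rw [List.map_map]
    refine List.map_congr_left (fun l _ => ?_)
    exact PySem.Str.toList_strip l
  rw [hmap]
  have hsep : (" " : String).toList = [' '] := rfl
  rw [hsep]
  apply pv_chars_strip_join
  · simp [hne]
  · intro q hq
    obtain ⟨l, hl, rfl⟩ := List.mem_map.mp hq
    obtain ⟨f1, f2⟩ := pv_strip_fix l.toList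
    refine ⟨f1, f2, ?_⟩
    intro hz
    apply h l hl
    apply String.toList_injective
    rw [PySem.Str.toList_strip, hz]
    rfl

-- ---- B's chunked loop computes aLoop ----

lemma pvAltLoop_nil (ps : List String) (m : List Int) : pvAltLoop [] ps m = (ps, m) := by
  rw [pvAltLoop]

lemma pvAltLoop_cons_blank (l : String) (rest ps : List String) (m : List Int)
    (h : pvBlankB l = true) :
    pvAltLoop (l :: rest) ps m
      = pvAltLoop (rest.dropWhile pvBlankB) ps
          (m ++ (-1 : Int) :: (rest.takeWhile pvBlankB).map (fun _ => (-1 : Int))) := by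
  rw [pvAltLoop]
  rw [dif_pos h]
  simp [List.dropWhile_cons, List.takeWhile_cons, h]

lemma pvAltLoop_cons_nonblank (l : String) (rest ps : List String) (m : List Int)
    (h : pvBlankB l = false) :
    pvAltLoop (l :: rest) ps m
      = pvAltLoop (rest.dropWhile (fun x => !pvBlankB x))
          (ps ++ [PySem.Str.join " " ((l :: rest.takeWhile (fun x => !pvBlankB x)).map PySem.Str.strip)])
          (m ++ (ps.length : Int) :: (rest.takeWhile (fun x => !pvBlankB x)).map (fun _ => (ps.length : Int))) := by
  rw [pvAltLoop]
  rw [dif_neg (by simp [h])]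
  simp [List.dropWhile_cons, List.takeWhile_cons, h]

lemma pv_dropWhile_head {α : Type} (p : α → Bool) (xs : List α) :
    List.dropWhile p xs = [] ∨ ∃ c t, List.dropWhile p xs = c :: t ∧ p c = false := by
  induction xs with
  | nil => exact Or.inl rfl
  | cons a t ih =>
    by_cases hp : p a = true
    · rw [List.dropWhile_cons, if_pos hp]
      exact ih
    · rw [List.dropWhile_cons, if_neg hp]
      exact Or.inr ⟨a, t, rfl, by simpa using hp⟩

lemma pv_alt_eq_aLoop (n : Nat) : ∀ (ls : List String), ls.length ≤ n →
    ∀ (ps : List String) (m : List Int),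
    pvAltLoop ls ps m = ((aLoop ls ps []).1, m ++ (aLoop ls ps []).2) := by
  induction n with
  | zero =>
    intro ls hl ps m
    rw [List.eq_nil_of_length_eq_zero (Nat.le_zero.mp hl)]
    simp [pvAltLoop_nil, aLoop_nil]
  | succ n ih =>
    intro ls hl ps m
    cases ls with
    | nil => simp [pvAltLoop_nil, aLoop_nil]
    | cons l rest =>
      have hrest : rest.length ≤ n := by
        simp only [List.length_cons] at hl
        omega
      by_cases hb : pvBlankB l = true
      · have hstrip : PySem.Str.strip l = "" := by simpa [pvBlankB] using hb
        rw [pvAltLoop_cons_blank _ _ _ _ hb,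
          ih _ (le_trans (List.length_dropWhile_le _ _) hrest)]
        have hsplit : l :: rest = (l :: rest.takeWhile pvBlankB) ++ rest.dropWhile pvBlankB := by
          rw [List.cons_append, List.takeWhile_append_dropWhile]
        conv_rhs => rw [hsplit]
        rw [pv_blank_run _ _ _
          (by
            intro x hx
            rcases List.mem_cons.mp hx with rfl | hx'
            · exact hstrip
            · simpa [pvBlankB] using List.mem_takeWhile_imp hx')]
        simp
      · have hstrip : PySem.Str.strip l ≠ "" := by simpa [pvBlankB] using hb
        have hbf : pvBlankB l = false := by simpa using hb
        rw [pvAltLoop_cons_nonblank _ _ _ _ hbf,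
          ih _ (le_trans (List.length_dropWhile_le _ _) hrest)]
        have hmemtk : ∀ x ∈ rest.takeWhile (fun x => !pvBlankB x), PySem.Str.strip x ≠ "" := by
          intro x hx
          have := List.mem_takeWhile_imp hx
          simpa [pvBlankB] using this
        rw [aLoop_cons_nb_nil _ _ _ hstrip]
        have hsplit : rest = rest.takeWhile (fun x => !pvBlankB x)
            ++ rest.dropWhile (fun x => !pvBlankB x) :=
          (List.takeWhile_append_dropWhile).symm
        conv_rhs => rw [hsplit]
        rw [pv_nonblank_run _ _ _ _ (by simp) (by simp) List.getLast?_concat hmemtk]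
        rw [List.dropLast_concat]
        have hP : pjA ([PySem.Str.strip l] ++ (rest.takeWhile (fun x => !pvBlankB x)).map PySem.Str.strip)
            = PySem.Str.join " " ((l :: rest.takeWhile (fun x => !pvBlankB x)).map PySem.Str.strip) := by
          rw [List.singleton_append, ← List.map_cons]
          unfold pjA
          exact pv_strip_join (l :: rest.takeWhile (fun x => !pvBlankB x)) (by simp)
            (by
              intro x hx
              rcases List.mem_cons.mp hx with rfl | hx'
              · exact hstrip
              · exact hmemtk x hx')
        rw [hP]
        have hcond : List.dropWhile (fun x => !pvBlankB x) rest = [] ∨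
            ∃ c t, List.dropWhile (fun x => !pvBlankB x) rest = c :: t ∧ PySem.Str.strip c = "" := by
          rcases pv_dropWhile_head (fun x => !pvBlankB x) rest with hn | ⟨c, t, hct, hc⟩
          · exact Or.inl hn
          · exact Or.inr ⟨c, t, hct, by simpa [pvBlankB] using hc⟩
        simp [pv_cur_irrel _ _ _ hcond]

-- ===== VERDICT (by name: the statement is the Claim_ definition above) =====
theorem split_paragraphs_with_index_py_spec : Claim_equal_split_paragraphs_with_index_py := by
  intro lines _
  show _ = split_paragraphs_with_index_py_alt lines
  obtain ⟨c, p, hA⟩ := pv_fold_eq_aLoop lines [] [] [] (-1) (by intro h; exact absurd rfl h) (by simp)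
  have hB := pv_alt_eq_aLoop lines.length lines le_rfl [] []
  unfold split_paragraphs_with_index_py split_paragraphs_with_index_py_alt
  simp only [List.length_nil, Int.natCast_zero] at hA
  rw [hB]
  simp only [List.nil_append] at hA ⊢
  rw [hA]
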